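-- pv_equiv track=rewrite | github.com/eliottcassidy2000/math | 04-computation/co_occ_general_k.py | compute_co_occ_k
-- ===== SOURCE A (Python) =====
-- from itertools import combinations
--
-- def count_ham_cycles(A, verts):
--     """Count directed Hamiltonian cycles on vertex set."""
--     k = len(verts)
--     if k == 3:
--         a, b, c = verts
--         return (A[a][b] * A[b][c] * A[c][a]) + (A[a][c] * A[c][b] * A[b][a])
--
--     dp = {}
--     dp[(1 << 0, 0)] = 1
--     for mask in range(1, 1 << k):
--         if not (mask & 1):
--             continue
--         for v in range(k):
--             if not (mask & (1 << v)):
--                 continue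
--             key = (mask, v)
--             if key not in dp or dp[key] == 0:
--                 continue
--             cnt = dp[key]
--             for w in range(k):
--                 if mask & (1 << w):
--                     continue
--                 if A[verts[v]][verts[w]]:
--                     nkey = (mask | (1 << w), w)
--                     dp[nkey] = dp.get(nkey, 0) + cnt
--
--     full = (1 << k) - 1
--     total = 0
--     for v in range(1, k):
--         key = (full, v)
--         if key in dp and dp[key] > 0:
--             if A[verts[v]][verts[0]]:
--                 total += dp[key]
--     return total
--
-- def has_ham_cycle(A, verts):
--     """Check if vertex set supports at least one directed Ham cycle."""
--     return count_ham_cycles(A, verts) > 0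
--
-- def compute_co_occ_k(A, p, k):
--     """Compute co_occ_k(d) = #{k-cycle vertex sets containing both 0 and d}.
--
--     Returns: (profile, n_sets, n_containing_0)
--     """
--     # Enumerate k-cycle vertex sets
--     cycle_sets = []
--     for subset in combinations(range(p), k):
--         if has_ham_cycle(A, list(subset)):
--             cycle_sets.append(frozenset(subset))
--
--     # Count those containing vertex 0
--     containing_0 = [fs for fs in cycle_sets if 0 in fs]
--
--     # Co-occurrence profile
--     profile = [0] * p
--     for fs in containing_0:
--         for v in fs:
--             if v != 0:
--                 profile[v] += 1
--
--     return profile, len(cycle_sets), len(containing_0)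
-- ===== SOURCE B (Python) =====
-- from itertools import combinations
--
-- def compute_co_occ_k(A, p, k):
--     """Compute co_occ_k(d) = #{k-cycle vertex sets containing both 0 and d}.
--
--     Returns: (profile, n_sets, n_containing_0)
--
--     Single pass: for each k-subset, decide cycle existence by recursive
--     backtracking (early exit) instead of a counting bitmask DP, and update
--     all three outputs on the fly.
--     """
--     def cycle_from(cur, remaining, start):
--         if not remaining:
--             return bool(A[cur][start])
--         for w in remaining:
--             if A[cur][w] and cycle_from(w, remaining - {w}, start):
--                 return True
--         return False
--
--     def has_cycle(verts):
--         if len(verts) < 2: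
--             return False
--         return cycle_from(verts[0], frozenset(verts[1:]), verts[0])
--
--     profile = [0] * p
--     n_sets = 0
--     n_zero = 0
--     for subset in combinations(range(p), k):
--         if has_cycle(subset):
--             n_sets += 1
--             if subset[0] == 0:
--                 n_zero += 1
--                 for v in subset[1:]:
--                     profile[v] += 1
--     return profile, n_sets, n_zero
-- ===== Notes on version B (the rewrite author's own statement) =====
-- stated objective: alternative
-- what changed: Per subset, the counting bitmask-DP over a dict of (mask,vertex) path counts is replaced by a recursive backtracking existence search that exits on the first Hamiltonian cycle found, and A's four passes (collect cycle sets, filter those containing 0, profile loop, counts) are fused into one fold over the subsets.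
-- outside the precondition, e.g. on compute_co_occ_k([[0, 0]], 2, 2): A returns ([0, 0], 0, 0), B returns ([0, 0], 0, 0)
import Mathlib
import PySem

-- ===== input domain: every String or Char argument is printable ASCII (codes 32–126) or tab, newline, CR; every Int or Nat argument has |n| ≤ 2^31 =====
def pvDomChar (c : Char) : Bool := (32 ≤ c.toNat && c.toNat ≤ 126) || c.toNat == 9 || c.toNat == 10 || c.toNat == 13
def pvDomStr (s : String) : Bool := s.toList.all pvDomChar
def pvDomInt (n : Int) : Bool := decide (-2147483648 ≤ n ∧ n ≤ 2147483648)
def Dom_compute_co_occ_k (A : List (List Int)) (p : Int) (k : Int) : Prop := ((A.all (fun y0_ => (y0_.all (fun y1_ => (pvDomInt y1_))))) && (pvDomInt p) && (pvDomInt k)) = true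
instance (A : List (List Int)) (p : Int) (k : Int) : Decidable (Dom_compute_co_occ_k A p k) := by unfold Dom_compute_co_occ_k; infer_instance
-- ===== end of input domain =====

-- B replaces A's per-subset counting bitmask-DP (dict of (mask,vertex) path counts) by a
-- recursive backtracking existence search, and fuses A's four passes (collect, filter,
-- profile, count) into a single fold; equivalence is proved on Pre_ below.

-- ===== PORT A =====
-- Python `A[i][j]` (indices in range under Pre_)
def pvEntry (A : List (List Int)) (i j : Int) : Int :=
  PySem.List.pyGetD (PySem.List.pyGetD A i []) j 0

-- itertools.combinations(xs, m) (shared: both Source A and Source B call it)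
def pvCombos : Nat → List Int → List (List Int)
  | 0, _ => [[]]
  | _ + 1, [] => []
  | m + 1, x :: xs => (pvCombos m xs).map (fun s => x :: s) ++ pvCombos (m + 1) xs

-- body of the innermost `for w in range(k)` loop of count_ham_cycles
def pvA_innerW (A : List (List Int)) (verts : List Int) (mask v : Nat) (cnt : Int)
    (dp : PySem.Dict (Nat × Nat) Int) (w : Nat) : PySem.Dict (Nat × Nat) Int :=
  if mask.testBit w then dp
  else if pvEntry A (verts.getD v 0) (verts.getD w 0) ≠ 0 then
    dp.insert (mask ||| 2 ^ w, w) (dp.getD (mask ||| 2 ^ w, w) 0 + cnt)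
  else dp

-- body of the `for v in range(k)` loop
def pvA_innerV (A : List (List Int)) (verts : List Int) (k mask : Nat)
    (dp : PySem.Dict (Nat × Nat) Int) (v : Nat) : PySem.Dict (Nat × Nat) Int :=
  if ¬ mask.testBit v then dp
  else match dp.get? (mask, v) with
    | none => dp
    | some cnt =>
      if cnt = 0 then dp
      else (List.range k).foldl (pvA_innerW A verts mask v cnt) dp

-- body of the `for mask in range(1, 1 << k)` loop
def pvA_outer (A : List (List Int)) (verts : List Int) (k : Nat)
    (dp : PySem.Dict (Nat × Nat) Int) (mask : Nat) : PySem.Dict (Nat × Nat) Int :=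
  if mask &&& 1 = 0 then dp
  else (List.range k).foldl (pvA_innerV A verts k mask) dp

-- the dp dict after the mask loop
def pvA_dpRun (A : List (List Int)) (verts : List Int) (k : Nat) : PySem.Dict (Nat × Nat) Int :=
  (List.range' 1 (2 ^ k - 1)).foldl (pvA_outer A verts k) ((PySem.Dict.empty).insert (1, 0) 1)

-- the closing `for v in range(1, k)` total loop
def pvA_total (A : List (List Int)) (verts : List Int) (k : Nat)
    (dp : PySem.Dict (Nat × Nat) Int) : Int :=
  (List.range' 1 (k - 1)).foldl (fun total v =>
    match dp.get? (2 ^ k - 1, v) with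
    | none => total
    | some d =>
      if d > 0 then
        if pvEntry A (verts.getD v 0) (verts.getD 0 0) ≠ 0 then total + d else total
      else total) 0

def pvA_countHam (A : List (List Int)) (verts : List Int) : Int :=
  let k := verts.length
  if k = 3 then
    let a := verts.getD 0 0
    let b := verts.getD 1 0
    let c := verts.getD 2 0
    pvEntry A a b * pvEntry A b c * pvEntry A c a + pvEntry A a c * pvEntry A c b * pvEntry A b a
  else
    pvA_total A verts k (pvA_dpRun A verts k)

def pvA_hasHam (A : List (List Int)) (verts : List Int) : Bool :=
  decide (pvA_countHam A verts > 0)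

-- `cycle_sets` accumulation loop
def pvA_cycleSets (A : List (List Int)) (combos : List (List Int)) : List (PySem.Set Int) :=
  combos.foldl (fun acc subset =>
    if pvA_hasHam A subset then acc ++ [PySem.Set.ofList subset] else acc) []

-- `for v in fs: if v != 0: profile[v] += 1`
def pvA_bumpSet (pr : List Int) (fs : PySem.Set Int) : List Int :=
  fs.foldl (fun pr v =>
    if v ≠ 0 then PySem.List.pySetD pr v (PySem.List.pyGetD pr v 0 + 1) else pr) pr

def compute_co_occ_k (A : List (List Int)) (p : Int) (k : Int) : List Int × Int × Int :=
  let cycle_sets := pvA_cycleSets A (pvCombos k.toNat (PySem.List.pyRange 0 p 1))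
  let containing_0 := cycle_sets.filter (fun fs => PySem.Set.contains fs 0)
  let profile := containing_0.foldl pvA_bumpSet (List.replicate p.toNat 0)
  (profile, (cycle_sets.length : Int), (containing_0.length : Int))

-- ===== PORT B =====
-- termination helper for the backtracking search (cited by `decreasing_by`)
theorem pvDiscardLen (s : PySem.Set Int) (w : Int) (hw : w ∈ s) :
    (PySem.Set.discard s w).length < s.length := by
  induction s with
  | nil => cases hw
  | cons x s ih =>
    by_cases hx : x = w
    · subst hx
      have hle : (List.filter (fun y => !y == x) s).length ≤ s.length :=
        List.length_filter_le _ _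
      simp only [PySem.Set.discard, List.filter_cons, beq_self_eq_true, Bool.not_true,
        Bool.false_eq_true, if_false, List.length_cons]
      omega
    · have hw' : w ∈ s := by
        rcases List.mem_cons.mp hw with h | h
        · exact absurd h.symm hx
        · exact h
      have hlt := ih hw'
      simp only [PySem.Set.discard, List.filter_cons] at hlt ⊢
      rw [show (!x == w) = true by simp [hx]]
      simp
      omega

-- recursive backtracking: can we walk from cur through all of `remaining` and close at start?
def pvB_cycleFrom (A : List (List Int)) (start cur : Int) (remaining : PySem.Set Int) : Bool :=
  if remaining = [] then decide (pvEntry A cur start ≠ 0)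
  else remaining.attach.any (fun x =>
    decide (pvEntry A cur x.1 ≠ 0) && pvB_cycleFrom A start x.1 (PySem.Set.discard remaining x.1))
termination_by remaining.length
decreasing_by exact pvDiscardLen remaining x.1 x.2

def pvB_hasCycle (A : List (List Int)) (verts : List Int) : Bool :=
  if verts.length < 2 then false
  else pvB_cycleFrom A (verts.getD 0 0) (verts.getD 0 0) (PySem.Set.ofList (verts.drop 1))

-- body of Source B's single `for subset in combinations(...)` loop
def pvB_step (A : List (List Int)) (acc : List Int × Int × Int) (subset : List Int) :
    List Int × Int × Int :=
  if pvB_hasCycle A subset then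
    if subset.head? = some 0 then
      ((subset.drop 1).foldl
          (fun pr v => PySem.List.pySetD pr v (PySem.List.pyGetD pr v 0 + 1)) acc.1,
        acc.2.1 + 1, acc.2.2 + 1)
    else (acc.1, acc.2.1 + 1, acc.2.2)
  else acc

def compute_co_occ_k_alt (A : List (List Int)) (p : Int) (k : Int) : List Int × Int × Int :=
  (pvCombos k.toNat (PySem.List.pyRange 0 p 1)).foldl (pvB_step A)
    (List.replicate p.toNat 0, 0, 0)

-- ===== PRECONDITION & SPEC =====
-- Pre_ excludes: k < 0 (combinations raises ValueError); matrices smaller than p×p when a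
-- k-subset is enumerated, 2 ≤ k ≤ p (A indexes A[i][j] for i, j < p: IndexError); and, only
-- for k = 3, matrices with a negative entry in the p×p block: there A's multiplicative
-- triangle test and B's edge-truthiness test are two defensible readings of "edge present"
-- for a signed adjacency matrix (A itself uses truthiness for every other k).
def Pre_compute_co_occ_k (A : List (List Int)) (p : Int) (k : Int) : Prop :=
  0 ≤ k ∧ ((2 ≤ k ∧ k ≤ p) →
    (p ≤ (A.length : Int) ∧ (∀ row ∈ A.take p.toNat, p ≤ (row.length : Int)) ∧
      (k = 3 → ∀ row ∈ A.take p.toNat, ∀ x ∈ row.take p.toNat, 0 ≤ x)))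
instance (A : List (List Int)) (p : Int) (k : Int) : Decidable (Pre_compute_co_occ_k A p k) := by
  unfold Pre_compute_co_occ_k; infer_instance

def pvWitness_compute_co_occ_k : List (List Int) × Int × Int := ([[0, 1], [1, 0]], 2, 2)

def Spec_compute_co_occ_k (A : List (List Int)) (p : Int) (k : Int) (out : List Int × Int × Int) : Prop := out = compute_co_occ_k_alt A p k
instance (A : List (List Int)) (p : Int) (k : Int) (out : List Int × Int × Int) : Decidable (Spec_compute_co_occ_k A p k out) := by unfold Spec_compute_co_occ_k; infer_instance

-- ===== CLAIM (what is proved, stated in full; the proofs are below) =====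
def Claim_equal_compute_co_occ_k : Prop := ∀ (A : List (List Int)) (p : Int) (k : Int), Dom_compute_co_occ_k A p k → Pre_compute_co_occ_k A p k → Spec_compute_co_occ_k A p k (compute_co_occ_k A p k)

-- ===== LEMMAS AND PROOFS =====

-- edge relations: on local indices (w.r.t. verts) and on vertex labels
def pvEL (A : List (List Int)) (a b : Int) : Bool := decide (pvEntry A a b ≠ 0)
def pvE (A : List (List Int)) (verts : List Int) (v w : Nat) : Bool :=
  pvEL A (verts.getD v 0) (verts.getD w 0)

-- a directed walk c → l₀ → l₁ → …, every step an edge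
def pvChain {α : Type} (E : α → α → Bool) : α → List α → Bool
  | _, [] => true
  | c, w :: ws => E c w && pvChain E w ws

def pvLast {α : Type} (c : α) (l : List α) : α := l.getLastD c

def pvMask : List Nat → Nat
  | [] => 0
  | i :: l => 2 ^ i ||| pvMask l

-- reachability states of A's dp: a truthy path from index 0 covering exactly `m`, ending at `v`
inductive pvQB (E : Nat → Nat → Bool) (n : Nat) : Nat → Nat → Prop
  | base : pvQB E n 1 0
  | step {m u w : Nat} : pvQB E n m u → m.testBit u = true → m.testBit w = false → w < n →
      E u w = true → pvQB E n (m ||| 2 ^ w) w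

-- "the k vertices can be arranged in a directed Hamiltonian cycle through index 0"
def pvSpecIdx (n : Nat) (E : Nat → Nat → Bool) : Prop :=
  ∃ l : List Nat, l.Perm (List.range' 1 (n - 1)) ∧ pvChain E 0 l = true ∧
    E (pvLast 0 l) 0 = true

-- ---- bit utilities ----
theorem pvTestBit_lt {m n i : Nat} (h : m < 2 ^ n) (hb : m.testBit i = true) : i < n := by
  by_contra hc
  have : m < 2 ^ i := lt_of_lt_of_le h (Nat.pow_le_pow_right (by norm_num) (by omega))
  simp [Nat.testBit_eq_false_of_lt this] at hb

theorem pvXor_lt {m v : Nat} (h : m.testBit v = true) : m ^^^ 2 ^ v < m := by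
  apply Nat.lt_of_testBit v
  · simp [Nat.testBit_xor, Nat.testBit_two_pow, h]
  · exact h
  · intro j hj
    simp [Nat.testBit_xor, Nat.testBit_two_pow, Nat.ne_of_lt hj]

theorem pvOr_xor {m w : Nat} (h : m.testBit w = false) : (m ||| 2 ^ w) ^^^ 2 ^ w = m := by
  apply Nat.eq_of_testBit_eq
  intro i
  by_cases hi : i = w
  · simp [Nat.testBit_xor, Nat.testBit_or, Nat.testBit_two_pow, hi, h]
  · simp [Nat.testBit_xor, Nat.testBit_or, Nat.testBit_two_pow, Ne.symm hi]

theorem pvXor_or {m w : Nat} (h : m.testBit w = true) : (m ^^^ 2 ^ w) ||| 2 ^ w = m := by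
  apply Nat.eq_of_testBit_eq
  intro i
  by_cases hi : i = w
  · simp [Nat.testBit_xor, Nat.testBit_or, Nat.testBit_two_pow, hi, h]
  · simp [Nat.testBit_xor, Nat.testBit_or, Nat.testBit_two_pow, Ne.symm hi]

theorem pvOr_ne {m w : Nat} (h : m.testBit w = false) : m ||| 2 ^ w ≠ m := by
  intro he
  have := congrArg (fun x => x.testBit w) he
  simp [Nat.testBit_or, Nat.testBit_two_pow, h] at this

theorem pvMask_mem (l : List Nat) (i : Nat) : (pvMask l).testBit i = true ↔ i ∈ l := by
  induction l with
  | nil => simp [pvMask]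
  | cons x l ih =>
    simp only [pvMask, Nat.testBit_or, Nat.testBit_two_pow, ih, Bool.or_eq_true,
      decide_eq_true_eq, List.mem_cons]
    constructor
    · rintro (h | h)
      · exact Or.inl h.symm
      · exact Or.inr h
    · rintro (h | h)
      · exact Or.inl h.symm
      · exact Or.inr h

-- ---- pvQB structural facts ----
theorem pvQB_zero {E : Nat → Nat → Bool} {n m v : Nat} (h : pvQB E n m v) :
    m.testBit 0 = true := by
  induction h with
  | base => simp
  | step h hu hw hn hE ih => rw [Nat.testBit_or]; simp [ih]

theorem pvQB_cases {E : Nat → Nat → Bool} {n m v : Nat} (h : pvQB E n m v) :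
    (m = 1 ∧ v = 0) ∨ (∃ m₀ u, m = m₀ ||| 2 ^ v ∧ m₀.testBit v = false ∧ m₀.testBit u = true ∧
      v < n ∧ E u v = true ∧ pvQB E n m₀ u) := by
  cases h with
  | base => exact Or.inl ⟨rfl, rfl⟩
  | step h hu hw hn hE => exact Or.inr ⟨_, _, rfl, hw, hu, hn, hE, h⟩

-- ---- chain/list utilities ----
theorem pvChain_append_singleton {α : Type} (E : α → α → Bool) (c : α) (l : List α) (w : α) :
    pvChain E c (l ++ [w]) = (pvChain E c l && E (pvLast c l) w) := by
  induction l generalizing c with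
  | nil => simp [pvChain, pvLast]
  | cons x l ih =>
    simp only [List.cons_append, pvChain, ih, pvLast, List.getLastD_cons, Bool.and_assoc]

theorem pvLast_append_singleton {α : Type} (c : α) (l : List α) (w : α) :
    pvLast c (l ++ [w]) = w := by
  simp [pvLast]

theorem pvLast_mem {α : Type} (c : α) (l : List α) (h : l ≠ []) : pvLast c l ∈ l := by
  cases l with
  | nil => simp at h
  | cons x l =>
    show (x :: l).getLastD c ∈ x :: l
    rw [List.getLastD_cons]
    exact List.getLastD_mem_cons

theorem pvLast_mem_cons {α : Type} (c : α) (l : List α) : pvLast c l ∈ c :: l := by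
  cases l with
  | nil => simp [pvLast]
  | cons x l => exact List.mem_cons_of_mem _ (pvLast_mem c (x :: l) (by simp))

theorem pvMask_append_singleton (l : List Nat) (w : Nat) :
    pvMask (l ++ [w]) = pvMask l ||| 2 ^ w := by
  induction l with
  | nil => simp [pvMask]
  | cons x l ih => simp [pvMask, ih, Nat.or_assoc]

-- ---- QB ↔ path lists ----
theorem pvQB_iff_list (E : Nat → Nat → Bool) (n m v : Nat) :
    pvQB E n m v ↔ ∃ l : List Nat, pvChain E 0 l = true ∧ (0 :: l).Nodup ∧
      (∀ x ∈ l, x < n) ∧ pvMask (0 :: l) = m ∧ pvLast 0 l = v := by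
  constructor
  · intro h
    induction h with
    | base =>
      exact ⟨[], rfl, by simp, by simp, by simp [pvMask], rfl⟩
    | step h hu hw hn hE ih =>
      obtain ⟨l, hc, hnd, hb, hm, hl⟩ := ih
      rename_i m₀ u w₀
      refine ⟨l ++ [w₀], ?_, ?_, ?_, ?_, ?_⟩
      · rw [pvChain_append_singleton, hc, hl]; simp [hE]
      · have hwnot : w₀ ∉ (0 :: l) := by
          intro hmem
          rw [← pvMask_mem _ _, hm] at hmem
          rw [hmem] at hw; cases hw
        have : (0 :: l) ++ [w₀] = 0 :: (l ++ [w₀]) := by simp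
        rw [← this]
        simp only [List.nodup_append]
        refine ⟨hnd, by simp, ?_⟩
        intro a ha b hb
        rw [List.mem_singleton] at hb
        subst hb
        exact fun he => hwnot (he ▸ ha)
      · intro x hx
        rcases List.mem_append.mp hx with h' | h'
        · exact hb x h'
        · rw [List.mem_singleton.mp h']; exact hn
      · have : (0 : Nat) :: (l ++ [w₀]) = (0 :: l) ++ [w₀] := by simp
        rw [this, pvMask_append_singleton, hm]
      · exact pvLast_append_singleton 0 l w₀
  · rintro ⟨l, hc, hnd, hb, hm, hl⟩
    induction l using List.reverseRecOn generalizing m v with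
    | nil =>
      subst hm
      subst hl
      have h1 : pvMask [0] = 1 := by simp [pvMask]
      rw [h1]
      exact pvQB.base
    | append_singleton l w ih =>
      rw [pvChain_append_singleton, Bool.and_eq_true] at hc
      obtain ⟨hcl, hE⟩ := hc
      have hsplit : (0 : Nat) :: (l ++ [w]) = (0 :: l) ++ [w] := by simp
      rw [hsplit, List.nodup_append] at hnd
      obtain ⟨hnd0, -, hdisj⟩ := hnd
      have hwnot : w ∉ (0 :: l) := by
        intro hmem
        exact hdisj w hmem w (by simp) rfl
      have hq := ih (pvMask (0 :: l)) (pvLast 0 l) hcl hnd0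
        (fun x hx => hb x (List.mem_append_left _ hx)) rfl rfl
      have hstep := pvQB.step hq
        ((pvMask_mem (0 :: l) (pvLast 0 l)).mpr (pvLast_mem_cons 0 l))
        (by
          cases hbit : (pvMask (0 :: l)).testBit w
          · rfl
          · exact absurd ((pvMask_mem _ _).mp hbit) hwnot)
        (hb w (by simp)) hE
      rw [hsplit, pvMask_append_singleton] at hm
      rw [pvLast_append_singleton] at hl
      rw [hm, hl] at hstep
      exact hstep

-- ---- the w-loop (pvL1) ----
theorem pvL1 (A : List (List Int)) (verts : List Int) (mask v : Nat) (cnt : Int)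
    (lw : List Nat) (hnd : lw.Nodup) (dp : PySem.Dict (Nat × Nat) Int) :
    (∀ v', (lw.foldl (pvA_innerW A verts mask v cnt) dp).get? (mask, v') = dp.get? (mask, v')) ∧
    (∀ m' w', (lw.foldl (pvA_innerW A verts mask v cnt) dp).getD (m', w') 0 =
      dp.getD (m', w') 0 +
        (if m' = mask ||| 2 ^ w' ∧ w' ∈ lw ∧ mask.testBit w' = false ∧ pvE A verts v w' = true
          then cnt else 0)) := by
  induction lw generalizing dp with
  | nil => exact ⟨fun v' => rfl, fun m' w' => by simp⟩
  | cons w0 lw ih =>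
    obtain ⟨hw0, hnd'⟩ := List.nodup_cons.mp hnd
    rw [List.foldl_cons]
    by_cases hb : mask.testBit w0 = true
    · have hstep : pvA_innerW A verts mask v cnt dp w0 = dp := by
        unfold pvA_innerW
        rw [if_pos hb]
      rw [hstep]
      obtain ⟨ih1, ih2⟩ := ih hnd' dp
      refine ⟨ih1, fun m' w' => ?_⟩
      rw [ih2 m' w']
      congr 1
      by_cases hww : w' = w0
      · subst hww; simp [hb]
      · simp [hww]
    · have hbf : mask.testBit w0 = false := by simpa using hb
      by_cases hc : pvEntry A (verts.getD v 0) (verts.getD w0 0) ≠ 0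
      · have hstep : pvA_innerW A verts mask v cnt dp w0 =
            dp.insert (mask ||| 2 ^ w0, w0) (dp.getD (mask ||| 2 ^ w0, w0) 0 + cnt) := by
          unfold pvA_innerW
          rw [if_neg hb, if_pos hc]
        rw [hstep]
        obtain ⟨ih1, ih2⟩ :=
          ih hnd' (dp.insert (mask ||| 2 ^ w0, w0) (dp.getD (mask ||| 2 ^ w0, w0) 0 + cnt))
        refine ⟨?_, ?_⟩
        · intro v'
          rw [ih1 v', PySem.Dict.get?_insert_of_ne]
          intro he
          exact pvOr_ne hbf (congrArg Prod.fst he).symm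
        · intro m' w'
          rw [ih2 m' w', PySem.Dict.getD_insert]
          by_cases hkey : ((m', w') : Nat × Nat) = (mask ||| 2 ^ w0, w0)
          · have hw' : w' = w0 := congrArg Prod.snd hkey
            subst hw'
            have hm' : m' = mask ||| 2 ^ w' := congrArg Prod.fst hkey
            subst hm'
            rw [if_pos rfl, if_neg, if_pos ⟨rfl, List.mem_cons_self, hbf,
              by simp only [pvE, pvEL, decide_eq_true_eq]; exact hc⟩]
            · omega
            · rintro ⟨-, hmem, -, -⟩
              exact hw0 hmem
          · rw [if_neg hkey]
            congr 1
            by_cases hww : w' = w0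
            · subst hww
              have hm' : ¬ m' = mask ||| 2 ^ w' := fun h => hkey (by rw [h])
              simp [hm']
            · simp [hww]
      · have hc0 : pvEntry A (verts.getD v 0) (verts.getD w0 0) = 0 := not_not.mp hc
        have hstep : pvA_innerW A verts mask v cnt dp w0 = dp := by
          unfold pvA_innerW
          rw [if_neg hb, if_neg hc]
        rw [hstep]
        obtain ⟨ih1, ih2⟩ := ih hnd' dp
        refine ⟨ih1, fun m' w' => ?_⟩
        rw [ih2 m' w']
        congr 1
        by_cases hww : w' = w0
        · rw [hww]
          have hEf : ¬ (pvE A verts v w0 = true) := by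
            simp only [pvE, pvEL, decide_eq_true_eq]
            exact not_not_intro hc0
          rw [if_neg (fun hC => hw0 hC.2.1), if_neg (fun hC => hEf hC.2.2.2)]
        · simp [hww]

-- ---- the v-loop (pvL2) ----
theorem pvL2 (A : List (List Int)) (verts : List Int) (n mask : Nat)
    (l : List Nat) (dp : PySem.Dict (Nat × Nat) Int)
    (hnn : ∀ key : Nat × Nat, 0 ≤ dp.getD key 0) :
    (∀ key : Nat × Nat, 0 ≤ (l.foldl (pvA_innerV A verts n mask) dp).getD key 0) ∧
    (∀ v', (l.foldl (pvA_innerV A verts n mask) dp).get? (mask, v') = dp.get? (mask, v')) ∧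
    (∀ m' w', 0 < (l.foldl (pvA_innerV A verts n mask) dp).getD (m', w') 0 ↔
      0 < dp.getD (m', w') 0 ∨ (m' = mask ||| 2 ^ w' ∧ mask.testBit w' = false ∧ w' < n ∧
        ∃ v ∈ l, mask.testBit v = true ∧ pvE A verts v w' = true ∧ 0 < dp.getD (mask, v) 0)) := by
  induction l generalizing dp with
  | nil => exact ⟨hnn, fun v' => rfl, fun m' w' => by simp⟩
  | cons v0 l ih =>
    rw [List.foldl_cons]
    by_cases htb : mask.testBit v0 = true
    · rcases hget : dp.get? (mask, v0) with _ | cnt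
      · have hstep : pvA_innerV A verts n mask dp v0 = dp := by
          simp [pvA_innerV, htb, hget]
        rw [hstep]
        obtain ⟨ih1, ih2, ih3⟩ := ih dp hnn
        refine ⟨ih1, ih2, fun m' w' => ?_⟩
        rw [ih3 m' w']
        have hz : dp.getD (mask, v0) 0 = 0 := by simp [PySem.Dict.getD, hget]
        constructor
        · rintro (h | ⟨hm, hb2, hwn, vv, hvv, hvb, hE, hp⟩)
          · exact Or.inl h
          · exact Or.inr ⟨hm, hb2, hwn, vv, List.mem_cons_of_mem _ hvv, hvb, hE, hp⟩
        · rintro (h | ⟨hm, hb2, hwn, vv, hvv, hvb, hE, hp⟩)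
          · exact Or.inl h
          · rcases List.mem_cons.mp hvv with rfl | hvv'
            · rw [hz] at hp; omega
            · exact Or.inr ⟨hm, hb2, hwn, vv, hvv', hvb, hE, hp⟩
      · by_cases hcnt : cnt = 0
        · have hstep : pvA_innerV A verts n mask dp v0 = dp := by
            simp [pvA_innerV, htb, hget, hcnt]
          rw [hstep]
          obtain ⟨ih1, ih2, ih3⟩ := ih dp hnn
          refine ⟨ih1, ih2, fun m' w' => ?_⟩
          rw [ih3 m' w']
          have hz : dp.getD (mask, v0) 0 = 0 := by simp [PySem.Dict.getD, hget, hcnt]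
          constructor
          · rintro (h | ⟨hm, hb2, hwn, vv, hvv, hvb, hE, hp⟩)
            · exact Or.inl h
            · exact Or.inr ⟨hm, hb2, hwn, vv, List.mem_cons_of_mem _ hvv, hvb, hE, hp⟩
          · rintro (h | ⟨hm, hb2, hwn, vv, hvv, hvb, hE, hp⟩)
            · exact Or.inl h
            · rcases List.mem_cons.mp hvv with rfl | hvv'
              · rw [hz] at hp; omega
              · exact Or.inr ⟨hm, hb2, hwn, vv, hvv', hvb, hE, hp⟩
        · have hgd : dp.getD (mask, v0) 0 = cnt := by simp [PySem.Dict.getD, hget]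
          have hcpos : 0 < cnt := by
            have := hnn (mask, v0)
            rw [hgd] at this
            omega
          have hstep : pvA_innerV A verts n mask dp v0 =
              (List.range n).foldl (pvA_innerW A verts mask v0 cnt) dp := by
            simp [pvA_innerV, htb, hget, hcnt]
          rw [hstep]
          obtain ⟨w1, w2⟩ := pvL1 A verts mask v0 cnt (List.range n) (List.nodup_range) dp
          have hnn1 : ∀ key : Nat × Nat,
              0 ≤ ((List.range n).foldl (pvA_innerW A verts mask v0 cnt) dp).getD key 0 := by
            intro key
            obtain ⟨m', w'⟩ := key
            rw [w2 m' w']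
            have := hnn (m', w')
            split_ifs <;> omega
          obtain ⟨ih1, ih2, ih3⟩ := ih _ hnn1
          have hkeep : ∀ vv : Nat,
              ((List.range n).foldl (pvA_innerW A verts mask v0 cnt) dp).getD (mask, vv) 0 =
              dp.getD (mask, vv) 0 := by
            intro vv
            rw [w2 mask vv, if_neg, add_zero]
            rintro ⟨he, -, hf, -⟩
            exact pvOr_ne hf he.symm
          refine ⟨ih1, ?_, ?_⟩
          · intro v'
            rw [ih2 v', w1 v']
          · intro m' w'
            rw [ih3 m' w']
            simp only [hkeep]
            rw [w2 m' w']
            constructor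
            · rintro (hpos | ⟨hm, hbitf, hwn, vv, hvv, hvb, hE, hvpos⟩)
              · by_cases hC : m' = mask ||| 2 ^ w' ∧ w' ∈ List.range n ∧
                    mask.testBit w' = false ∧ pvE A verts v0 w' = true
                · refine Or.inr ⟨hC.1, hC.2.2.1, List.mem_range.mp hC.2.1, v0,
                    List.mem_cons_self, htb, hC.2.2.2, ?_⟩
                  rw [hgd]; exact hcpos
                · rw [if_neg hC, add_zero] at hpos
                  exact Or.inl hpos
              · exact Or.inr ⟨hm, hbitf, hwn, vv, List.mem_cons_of_mem _ hvv, hvb, hE, hvpos⟩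
            · rintro (hpos | ⟨hm, hbitf, hwn, vv, hvv, hvb, hE, hvpos⟩)
              · left
                have := hnn (m', w')
                split_ifs <;> omega
              · rcases List.mem_cons.mp hvv with rfl | hvv'
                · left
                  rw [if_pos ⟨hm, List.mem_range.mpr hwn, hbitf, hE⟩]
                  have := hnn (m', w')
                  omega
                · exact Or.inr ⟨hm, hbitf, hwn, vv, hvv', hvb, hE, hvpos⟩
    · have hstep : pvA_innerV A verts n mask dp v0 = dp := by
        simp [pvA_innerV, htb]
      rw [hstep]
      obtain ⟨ih1, ih2, ih3⟩ := ih dp hnn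
      refine ⟨ih1, ih2, fun m' w' => ?_⟩
      rw [ih3 m' w']
      constructor
      · rintro (h | ⟨hm, hb2, hwn, vv, hvv, hvb, hE, hp⟩)
        · exact Or.inl h
        · exact Or.inr ⟨hm, hb2, hwn, vv, List.mem_cons_of_mem _ hvv, hvb, hE, hp⟩
      · rintro (h | ⟨hm, hb2, hwn, vv, hvv, hvb, hE, hp⟩)
        · exact Or.inl h
        · rcases List.mem_cons.mp hvv with rfl | hvv'
          · exact absurd hvb htb
          · exact Or.inr ⟨hm, hb2, hwn, vv, hvv', hvb, hE, hp⟩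

-- ---- the mask-loop invariant (pvL3) ----
theorem pvL3 (A : List (List Int)) (verts : List Int) (n : Nat) (t : Nat) (ht : t ≤ 2 ^ n - 1) :
    (∀ key : Nat × Nat,
      0 ≤ ((List.range' 1 t).foldl (pvA_outer A verts n) ((PySem.Dict.empty).insert (1, 0) 1)).getD key 0) ∧
    (∀ m w : Nat,
      0 < ((List.range' 1 t).foldl (pvA_outer A verts n) ((PySem.Dict.empty).insert (1, 0) 1)).getD (m, w) 0 ↔
      m.testBit w = true ∧ m ^^^ 2 ^ w < 1 + t ∧ pvQB (pvE A verts) n m w) := by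
  induction t with
  | zero =>
    simp only [show List.range' 1 0 = ([] : List Nat) from rfl, List.foldl_nil]
    constructor
    · intro key
      rw [PySem.Dict.getD_insert]
      split_ifs
      · omega
      · rw [PySem.Dict.getD_empty]
    · intro m w
      rw [PySem.Dict.getD_insert]
      by_cases hk : ((m, w) : Nat × Nat) = (1, 0)
      · have hm : m = 1 := congrArg Prod.fst hk
        have hw : w = 0 := congrArg Prod.snd hk
        subst hm; subst hw
        rw [if_pos rfl]
        constructor
        · intro _
          refine ⟨by decide, by decide, pvQB.base⟩
        · intro _; omega
      · rw [if_neg hk, PySem.Dict.getD_empty]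
        constructor
        · intro h; omega
        · rintro ⟨hbit, hlt, hq⟩
          exfalso
          have hm2 : m = 2 ^ w := by
            have h0 : m ^^^ 2 ^ w = 0 := by omega
            exact Nat.xor_eq_zero_iff.mp h0
          rcases pvQB_cases hq with ⟨h1, h2⟩ | ⟨m₀, u, hmm, hbw, hbu, hwn, hE, hq0⟩
          · exact hk (by rw [h1, h2])
          · have huw : u = w := by
              have h1 : (m₀ ||| 2 ^ w).testBit u = true := by
                simp [Nat.testBit_or, hbu]
              rw [← hmm, hm2, Nat.testBit_two_pow] at h1
              exact (decide_eq_true_eq.mp h1).symm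
            rw [huw] at hbu
            rw [hbu] at hbw
            cases hbw
  | succ t iht =>
    have ht' : t ≤ 2 ^ n - 1 := by omega
    obtain ⟨ihn, ihp⟩ := iht ht'
    have hconcat : List.range' 1 (t + 1) = List.range' 1 t ++ [1 + t] := by
      have := List.range'_concat (step := 1) (s := 1) (n := t)
      simpa using this
    rw [hconcat, List.foldl_append, List.foldl_cons, List.foldl_nil]
    by_cases hodd : (1 + t) &&& 1 = 0
    · rw [show pvA_outer A verts n
          ((List.range' 1 t).foldl (pvA_outer A verts n) (PySem.Dict.empty.insert (1, 0) 1)) (1 + t) =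
          (List.range' 1 t).foldl (pvA_outer A verts n) (PySem.Dict.empty.insert (1, 0) 1) by
        simp [pvA_outer, hodd]]
      refine ⟨ihn, fun m w => ?_⟩
      rw [ihp m w]
      constructor
      · rintro ⟨h1, h2, h3⟩; exact ⟨h1, by omega, h3⟩
      · rintro ⟨h1, h2, h3⟩
        refine ⟨h1, ?_, h3⟩
        rcases Nat.lt_or_ge (m ^^^ 2 ^ w) (1 + t) with hlt | hge
        · omega
        · exfalso
          have heq : m ^^^ 2 ^ w = 1 + t := by omega
          have hpar : (1 + t) % 2 = 0 := by
            have := Nat.and_one_is_mod (1 + t)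
            omega
          rcases pvQB_cases h3 with ⟨hm1, hw0⟩ | ⟨m₀, u, hmm, hbw, hbu, hwn, hE, hq0⟩
          · subst hm1; subst hw0
            simp at heq
            omega
          · have hpred : m ^^^ 2 ^ w = m₀ := by rw [hmm, pvOr_xor hbw]
            have hodd0 : m₀ % 2 = 1 := by
              have := pvQB_zero hq0
              rw [Nat.testBit_zero] at this
              exact decide_eq_true_eq.mp this
            omega
    · have hmask_lt : 1 + t < 2 ^ n := by
        have := Nat.two_pow_pos n
        omega
      obtain ⟨L2n, L2p, L2iff⟩ := pvL2 A verts n (1 + t) (List.range n)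
        ((List.range' 1 t).foldl (pvA_outer A verts n) (PySem.Dict.empty.insert (1, 0) 1)) ihn
      rw [show pvA_outer A verts n
          ((List.range' 1 t).foldl (pvA_outer A verts n) (PySem.Dict.empty.insert (1, 0) 1)) (1 + t) =
          (List.range n).foldl (pvA_innerV A verts n (1 + t))
            ((List.range' 1 t).foldl (pvA_outer A verts n) (PySem.Dict.empty.insert (1, 0) 1)) by
        unfold pvA_outer
        rw [if_neg hodd]]
      refine ⟨L2n, fun m w => ?_⟩
      rw [L2iff m w]
      constructor
      · rintro (hpos | ⟨hm, hbit, hwn, v, hv, hvb, hE, hvpos⟩)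
        · obtain ⟨h1, h2, h3⟩ := (ihp m w).mp hpos
          exact ⟨h1, by omega, h3⟩
        · have hvQB : pvQB (pvE A verts) n (1 + t) v := ((ihp (1 + t) v).mp hvpos).2.2
          have hq : pvQB (pvE A verts) n ((1 + t) ||| 2 ^ w) w := pvQB.step hvQB hvb hbit hwn hE
          refine ⟨?_, ?_, hm ▸ hq⟩
          · rw [hm]; simp [Nat.testBit_or, Nat.testBit_two_pow]
          · rw [hm, pvOr_xor hbit]; omega
      · rintro ⟨h1, h2, h3⟩
        rcases Nat.lt_or_ge (m ^^^ 2 ^ w) (1 + t) with hlt | hge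
        · exact Or.inl ((ihp m w).mpr ⟨h1, hlt, h3⟩)
        · have heq : m ^^^ 2 ^ w = 1 + t := by omega
          right
          have hbitw : (1 + t).testBit w = false := by
            rw [← heq]
            simp [Nat.testBit_xor, Nat.testBit_two_pow, h1]
          have hm : m = (1 + t) ||| 2 ^ w := by rw [← heq, pvXor_or h1]
          rcases pvQB_cases h3 with ⟨hm1, hw0⟩ | ⟨m₀, u, hmm, hbw, hbu, hwn, hE, hq0⟩
          · exfalso
            subst hm1; subst hw0
            simp at heq
            omega
          · have hm0 : m₀ = 1 + t := by
              rw [← heq, hmm, pvOr_xor hbw]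
            subst hm0
            have hu_lt : u < n := pvTestBit_lt hmask_lt hbu
            refine ⟨hm, hbitw, hwn, u, List.mem_range.mpr hu_lt, hbu, hE, ?_⟩
            refine (ihp (1 + t) u).mpr ⟨hbu, ?_, hq0⟩
            have := pvXor_lt hbu
            omega

-- ---- the total loop (pvL4) and A-side characterisation ----
theorem pvA_char (A : List (List Int)) (verts : List Int) (h3 : verts.length ≠ 3)
    (h2 : 2 ≤ verts.length) :
    (0 < pvA_countHam A verts) ↔ pvSpecIdx verts.length (pvE A verts) := by
  have hn : 2 ≤ verts.length := h2
  obtain ⟨hnn, hiff⟩ := pvL3 A verts verts.length (2 ^ verts.length - 1) le_rfl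
  have hdp : pvA_dpRun A verts verts.length =
      (List.range' 1 (2 ^ verts.length - 1)).foldl (pvA_outer A verts verts.length)
        (PySem.Dict.empty.insert (1, 0) 1) := rfl
  rw [← hdp] at hnn hiff
  have htot : ∀ (lv : List Nat) (acc : Int), 0 ≤ acc →
      0 ≤ lv.foldl (fun total v =>
        match (pvA_dpRun A verts verts.length).get? (2 ^ verts.length - 1, v) with
        | none => total
        | some d => if d > 0 then
            if pvEntry A (verts.getD v 0) (verts.getD 0 0) ≠ 0 then total + d else total
          else total) acc ∧
      (0 < lv.foldl (fun total v =>
        match (pvA_dpRun A verts verts.length).get? (2 ^ verts.length - 1, v) with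
        | none => total
        | some d => if d > 0 then
            if pvEntry A (verts.getD v 0) (verts.getD 0 0) ≠ 0 then total + d else total
          else total) acc ↔ 0 < acc ∨ ∃ v ∈ lv,
        0 < (pvA_dpRun A verts verts.length).getD (2 ^ verts.length - 1, v) 0 ∧
        pvEntry A (verts.getD v 0) (verts.getD 0 0) ≠ 0) := by
    intro lv
    induction lv with
    | nil =>
      intro acc hacc
      exact ⟨hacc, by simp⟩
    | cons v0 lv ih =>
      intro acc hacc
      rw [List.foldl_cons]
      rcases hget : (pvA_dpRun A verts verts.length).get? (2 ^ verts.length - 1, v0) with _ | d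
      · simp only [hget]
        have hz : (pvA_dpRun A verts verts.length).getD (2 ^ verts.length - 1, v0) 0 = 0 := by
          rw [PySem.Dict.getD, hget]
          rfl
        obtain ⟨iha, ihb⟩ := ih acc hacc
        refine ⟨iha, ?_⟩
        rw [ihb]
        constructor
        · rintro (hpos | ⟨v, hv, hvp, hvE⟩)
          · exact Or.inl hpos
          · exact Or.inr ⟨v, List.mem_cons_of_mem _ hv, hvp, hvE⟩
        · rintro (hpos | ⟨v, hv, hvp, hvE⟩)
          · exact Or.inl hpos
          · rcases List.mem_cons.mp hv with rfl | hv'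
            · rw [hz] at hvp
              omega
            · exact Or.inr ⟨v, hv', hvp, hvE⟩
      · simp only [hget]
        have hgd : (pvA_dpRun A verts verts.length).getD (2 ^ verts.length - 1, v0) 0 = d := by
          rw [PySem.Dict.getD, hget]
          rfl
        by_cases hdpos : d > 0
        · rw [if_pos hdpos]
          by_cases hEp : pvEntry A (verts.getD v0 0) (verts.getD 0 0) ≠ 0
          · rw [if_pos hEp]
            obtain ⟨iha, ihb⟩ := ih (acc + d) (by omega)
            refine ⟨iha, ?_⟩
            rw [ihb]
            constructor
            · rintro (hpos | ⟨v, hv, hvp, hvE⟩)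
              · refine Or.inr ⟨v0, List.mem_cons_self, ?_, hEp⟩
                rw [hgd]
                exact hdpos
              · exact Or.inr ⟨v, List.mem_cons_of_mem _ hv, hvp, hvE⟩
            · intro _
              exact Or.inl (by omega)
          · rw [if_neg hEp]
            obtain ⟨iha, ihb⟩ := ih acc hacc
            refine ⟨iha, ?_⟩
            rw [ihb]
            constructor
            · rintro (hpos | ⟨v, hv, hvp, hvE⟩)
              · exact Or.inl hpos
              · exact Or.inr ⟨v, List.mem_cons_of_mem _ hv, hvp, hvE⟩
            · rintro (hpos | ⟨v, hv, hvp, hvE⟩)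
              · exact Or.inl hpos
              · rcases List.mem_cons.mp hv with rfl | hv'
                · exact absurd hvE hEp
                · exact Or.inr ⟨v, hv', hvp, hvE⟩
        · rw [if_neg hdpos]
          obtain ⟨iha, ihb⟩ := ih acc hacc
          refine ⟨iha, ?_⟩
          rw [ihb]
          constructor
          · rintro (hpos | ⟨v, hv, hvp, hvE⟩)
            · exact Or.inl hpos
            · exact Or.inr ⟨v, List.mem_cons_of_mem _ hv, hvp, hvE⟩
          · rintro (hpos | ⟨v, hv, hvp, hvE⟩)
            · exact Or.inl hpos
            · rcases List.mem_cons.mp hv with rfl | hv'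
              · rw [hgd] at hvp
                omega
              · exact Or.inr ⟨v, hv', hvp, hvE⟩
  have hcount : pvA_countHam A verts =
      pvA_total A verts verts.length (pvA_dpRun A verts verts.length) := by
    unfold pvA_countHam
    rw [if_neg h3]
  rw [hcount]
  unfold pvA_total
  obtain ⟨-, htotiff⟩ := htot (List.range' 1 (verts.length - 1)) 0 le_rfl
  rw [htotiff]
  simp only [lt_irrefl, false_or]
  constructor
  · rintro ⟨v, hvmem, hvpos, hvE⟩
    obtain ⟨hbit, -, hq⟩ := (hiff (2 ^ verts.length - 1) v).mp hvpos
    obtain ⟨l, hc, hndl, hb, hm, hl⟩ :=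
      (pvQB_iff_list (pvE A verts) verts.length (2 ^ verts.length - 1) v).mp hq
    obtain ⟨hv1, hvn⟩ := List.mem_range'_1.mp hvmem
    refine ⟨l, ?_, hc, ?_⟩
    · rw [List.perm_ext_iff_of_nodup (List.nodup_cons.mp hndl).2 (List.nodup_range' 1)]
      intro x
      constructor
      · intro hx
        have hxn := hb x hx
        have hx0 : x ≠ 0 := fun h => (List.nodup_cons.mp hndl).1 (h ▸ hx)
        exact List.mem_range'_1.mpr ⟨by omega, by omega⟩
      · intro hx
        obtain ⟨hx1, hxn⟩ := List.mem_range'_1.mp hx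
        have hbitx : (pvMask (0 :: l)).testBit x = true := by
          rw [hm, Nat.testBit_two_pow_sub_one]
          simp
          omega
        rcases List.mem_cons.mp ((pvMask_mem (0 :: l) x).mp hbitx) with rfl | hmem'
        · omega
        · exact hmem'
    · rw [hl]
      simp only [pvE, pvEL, decide_eq_true_eq]
      exact hvE
  · rintro ⟨l, hperm, hc, hE⟩
    have hlen : l.length = verts.length - 1 := by simpa using hperm.length_eq
    have hlnil : l ≠ [] := by
      intro h
      rw [h] at hlen
      simp at hlen
      omega
    have hvmeml : pvLast 0 l ∈ l := pvLast_mem 0 l hlnil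
    have hvmem := hperm.mem_iff.mp hvmeml
    have hndl : l.Nodup := hperm.nodup_iff.mpr (List.nodup_range' 1)
    have h0not : (0 : Nat) ∉ l := by
      intro h
      obtain ⟨h1, -⟩ := List.mem_range'_1.mp (hperm.mem_iff.mp h)
      omega
    have hmask : pvMask (0 :: l) = 2 ^ verts.length - 1 := by
      apply Nat.eq_of_testBit_eq
      intro i
      rw [Nat.testBit_two_pow_sub_one]
      by_cases hi : i < verts.length
      · rcases Nat.eq_zero_or_pos i with rfl | hipos
        · simp [(pvMask_mem (0 :: l) 0).mpr (List.mem_cons_self), hi]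
        · have him : i ∈ l := hperm.mem_iff.mpr (List.mem_range'_1.mpr ⟨hipos, by omega⟩)
          simp [(pvMask_mem (0 :: l) i).mpr (List.mem_cons_of_mem _ him), hi]
      · have hnotmem : i ∉ (0 :: l) := by
          intro hmem
          rcases List.mem_cons.mp hmem with rfl | hmem'
          · omega
          · obtain ⟨-, hlt⟩ := List.mem_range'_1.mp (hperm.mem_iff.mp hmem')
            omega
        have hfalse : (pvMask (0 :: l)).testBit i = false := by
          cases hbit : (pvMask (0 :: l)).testBit i
          · rfl
          · exact absurd ((pvMask_mem _ _).mp hbit) hnotmem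
        simp [hfalse, hi]
    obtain ⟨hv1, hvn⟩ := List.mem_range'_1.mp hvmem
    have hq := (pvQB_iff_list (pvE A verts) verts.length (2 ^ verts.length - 1) (pvLast 0 l)).mpr
      ⟨l, hc, List.nodup_cons.mpr ⟨h0not, hndl⟩, (fun x hx => by
        obtain ⟨-, h⟩ := List.mem_range'_1.mp (hperm.mem_iff.mp hx)
        omega), hmask, rfl⟩
    have hbitv : (2 ^ verts.length - 1).testBit (pvLast 0 l) = true := by
      rw [Nat.testBit_two_pow_sub_one]
      simp
      omega
    refine ⟨pvLast 0 l, hvmem, ?_, ?_⟩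
    · apply (hiff _ _).mpr
      refine ⟨hbitv, ?_, hq⟩
      have := pvXor_lt hbitv
      omega
    · have := hE
      simp only [pvE, pvEL, decide_eq_true_eq] at this
      exact this

-- ---- B-side characterisation ----
theorem pvB_cycleFrom_iff (A : List (List Int)) (start : Int) :
    ∀ (R : PySem.Set Int), R.Nodup → ∀ c,
      (pvB_cycleFrom A start c R = true ↔
        ∃ l : List Int, l.Perm R ∧ pvChain (pvEL A) c l = true ∧
          pvEL A (pvLast c l) start = true) := by
  have hnilcase : ∀ c : Int, (pvB_cycleFrom A start c [] = true ↔
      ∃ l : List Int, l.Perm ([] : List Int) ∧ pvChain (pvEL A) c l = true ∧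
        pvEL A (pvLast c l) start = true) := by
    intro c
    rw [pvB_cycleFrom, if_pos rfl]
    constructor
    · intro h
      exact ⟨[], List.Perm.refl [], rfl, by simpa [pvEL, pvLast] using h⟩
    · rintro ⟨l, hp, -, hE⟩
      have hl : l = [] := List.perm_nil.mp hp
      subst hl
      simpa [pvEL, pvLast] using hE
  have main : ∀ (N : Nat) (R : PySem.Set Int), R.length ≤ N → R.Nodup → ∀ c,
      (pvB_cycleFrom A start c R = true ↔
        ∃ l : List Int, l.Perm R ∧ pvChain (pvEL A) c l = true ∧
          pvEL A (pvLast c l) start = true) := by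
    intro N
    induction N with
    | zero =>
      intro R hR hnd c
      have hRnil : R = [] := List.eq_nil_of_length_eq_zero (Nat.le_zero.mp hR)
      subst hRnil
      exact hnilcase c
    | succ N ihN =>
      intro R hR hnd c
      by_cases hRnil : R = []
      · subst hRnil
        exact hnilcase c
      · rw [pvB_cycleFrom, if_neg hRnil, List.any_eq_true]
        have herase : ∀ w : Int, PySem.Set.discard R w = R.erase w := by
          intro w
          rw [List.Nodup.erase_eq_filter hnd w]
          rfl
        constructor
        · rintro ⟨⟨w, hwR⟩, -, hfx⟩
          rw [Bool.and_eq_true] at hfx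
          obtain ⟨hEcw, hrec⟩ := hfx
          have hnd' : (PySem.Set.discard R w).Nodup := List.Nodup.filter _ hnd
          have hlen : (PySem.Set.discard R w).length ≤ N := by
            have := pvDiscardLen R w hwR
            omega
          obtain ⟨l', hl'p, hl'c, hl'E⟩ := (ihN _ hlen hnd' w).mp hrec
          refine ⟨w :: l', ?_, ?_, ?_⟩
          · rw [herase w] at hl'p
            exact (hl'p.cons w).trans (List.perm_cons_erase hwR).symm
          · simp [pvChain, pvEL, hEcw, hl'c]
          · rw [show pvLast c (w :: l') = pvLast w l' from List.getLastD_cons]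
            exact hl'E
        · rintro ⟨l, hlp, hlc, hlE⟩
          rcases l with _ | ⟨w, l'⟩
          · exact absurd (List.perm_nil.mp hlp.symm) hRnil
          · obtain ⟨hwR, hl'e⟩ := List.cons_perm_iff_perm_erase.mp hlp
            rw [pvChain, Bool.and_eq_true] at hlc
            obtain ⟨hEcw, hl'c⟩ := hlc
            have hnd' : (PySem.Set.discard R w).Nodup := List.Nodup.filter _ hnd
            have hlen : (PySem.Set.discard R w).length ≤ N := by
              have := pvDiscardLen R w hwR
              omega
            refine ⟨⟨w, hwR⟩, List.mem_attach _ _, ?_⟩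
            rw [Bool.and_eq_true]
            refine ⟨hEcw, ?_⟩
            apply (ihN _ hlen hnd' w).mpr
            refine ⟨l', ?_, hl'c, ?_⟩
            · rw [herase w]
              exact hl'e
            · rw [show pvLast c (w :: l') = pvLast w l' from List.getLastD_cons] at hlE
              exact hlE
  intro R hnd c
  exact main R.length R le_rfl hnd c

theorem pvChain_map {α β : Type} (g : α → β) (E : β → β → Bool) (c : α) (l : List α) :
    pvChain (fun x y => E (g x) (g y)) c l = pvChain E (g c) (l.map g) := by
  induction l generalizing c with
  | nil => rfl
  | cons x l ih => simp [pvChain, ih]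

theorem pvLast_map {α β : Type} (g : α → β) (c : α) (l : List α) :
    pvLast (g c) (l.map g) = g (pvLast c l) := by
  show (l.map g).getLastD (g c) = g (l.getLastD c)
  exact List.getLastD_map

theorem pvB_hasCycle_iff (A : List (List Int)) (verts : List Int) (hnd : verts.Nodup)
    (h2 : 2 ≤ verts.length) :
    pvB_hasCycle A verts = true ↔ pvSpecIdx verts.length (pvE A verts) := by
  have hnot : ¬ (verts.length < 2) := by omega
  unfold pvB_hasCycle
  rw [if_neg hnot]
  have hdropnd : (verts.drop 1).Nodup := (List.drop_sublist 1 verts).nodup hnd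
  rw [PySem.Set.ofList_eq_self_of_nodup _ hdropnd]
  rw [pvB_cycleFrom_iff A (verts.getD 0 0) (verts.drop 1) hdropnd (verts.getD 0 0)]
  have hdrop : verts.drop 1 = (List.range' 1 (verts.length - 1)).map (fun i => verts.getD i 0) := by
    apply List.ext_getElem
    · simp
    · intro i h1 h2'
      simp only [List.getElem_map, List.getElem_range', List.getElem_drop]
      rw [List.getD_eq_getElem]
      · congr 1
        omega
      · simp at h2'
        omega
  constructor
  · rintro ⟨l', hp, hc, hE⟩
    have hmemverts : ∀ x ∈ l', x ∈ verts := by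
      intro x hx
      exact List.mem_of_mem_drop (hp.mem_iff.mp hx)
    have hfg : ∀ x ∈ verts, verts.getD (List.idxOf x verts) 0 = x := by
      intro x hx
      have hlt : List.idxOf x verts < verts.length := List.idxOf_lt_length_of_mem hx
      rw [List.getD_eq_getElem _ _ hlt]
      exact List.getElem_idxOf hlt
    have hmapg : (verts.drop 1).map (fun x => List.idxOf x verts) =
        List.range' 1 (verts.length - 1) := by
      apply List.ext_getElem
      · simp
      · intro i h1 h2'
        simp only [List.getElem_map, List.getElem_range', List.getElem_drop]
        have hidx : 1 + i < verts.length := by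
          simp at h1
          omega
        have := List.Nodup.idxOf_getElem hnd (1 + i) hidx
        simpa using this
    refine ⟨l'.map (fun x => List.idxOf x verts), ?_, ?_, ?_⟩
    · rw [← hmapg]
      exact hp.map _
    · rw [show pvChain (pvE A verts) 0 (l'.map (fun x => List.idxOf x verts)) =
          pvChain (pvEL A) (verts.getD 0 0)
            ((l'.map (fun x => List.idxOf x verts)).map (fun i => verts.getD i 0)) from
        pvChain_map (fun i => verts.getD i 0) (pvEL A) 0 (l'.map (fun x => List.idxOf x verts))]
      rw [List.map_map]
      have hid : l'.map ((fun i => verts.getD i 0) ∘ (fun x => List.idxOf x verts)) = l' :=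
        calc l'.map ((fun i => verts.getD i 0) ∘ (fun x => List.idxOf x verts))
            = l'.map id := List.map_congr_left (fun x hx => hfg x (hmemverts x hx))
          _ = l' := List.map_id l'
      rw [hid]
      exact hc
    · show pvEL A (verts.getD (pvLast 0 (l'.map (fun x => List.idxOf x verts))) 0)
        (verts.getD (0 : Nat) 0) = true
      have hlast := pvLast_map (fun i => verts.getD i 0) 0
        (l'.map (fun x => List.idxOf x verts))
      rw [← hlast]
      rw [List.map_map]
      have hid : l'.map ((fun i => verts.getD i 0) ∘ (fun x => List.idxOf x verts)) = l' :=
        calc l'.map ((fun i => verts.getD i 0) ∘ (fun x => List.idxOf x verts))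
            = l'.map id := List.map_congr_left (fun x hx => hfg x (hmemverts x hx))
          _ = l' := List.map_id l'
      rw [hid]
      exact hE
  · rintro ⟨l, hp, hc, hE⟩
    refine ⟨l.map (fun i => verts.getD i 0), ?_, ?_, ?_⟩
    · rw [hdrop]
      exact hp.map _
    · rw [← pvChain_map (fun i => verts.getD i 0) (pvEL A) 0 l]
      exact hc
    · rw [show (verts.getD (0 : Nat) 0) = (fun i => verts.getD i 0) (0 : Nat) from rfl,
        pvLast_map (fun i => verts.getD i 0) 0 l]
      exact hE

-- ---- degenerate and k = 3 cases ----
theorem pvA_small (A : List (List Int)) (verts : List Int) (h : verts.length < 2) :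
    pvA_countHam A verts = 0 := by
  rcases verts with _ | ⟨x, _ | ⟨y, l⟩⟩
  · rfl
  · rfl
  · simp at h

theorem pvFormula_pos (x1 x2 x3 y1 y2 y3 : Int) (h1 : 0 ≤ x1) (h2 : 0 ≤ x2) (h3 : 0 ≤ x3)
    (h4 : 0 ≤ y1) (h5 : 0 ≤ y2) (h6 : 0 ≤ y3) :
    (0 < x1 * x2 * x3 + y1 * y2 * y3) ↔
      ((x1 ≠ 0 ∧ x2 ≠ 0 ∧ x3 ≠ 0) ∨ (y1 ≠ 0 ∧ y2 ≠ 0 ∧ y3 ≠ 0)) := by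
  constructor
  · intro h
    by_contra hc
    push_neg at hc
    obtain ⟨hcx, hcy⟩ := hc
    have hx : x1 * x2 * x3 = 0 := by
      by_cases e1 : x1 = 0
      · simp [e1]
      by_cases e2 : x2 = 0
      · simp [e2]
      · simp [hcx e1 e2]
    have hy : y1 * y2 * y3 = 0 := by
      by_cases e1 : y1 = 0
      · simp [e1]
      by_cases e2 : y2 = 0
      · simp [e2]
      · simp [hcy e1 e2]
    rw [hx, hy] at h
    omega
  · rintro (⟨h1', h2', h3'⟩ | ⟨h1', h2', h3'⟩)
    · have hp : 0 < x1 * x2 * x3 :=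
        mul_pos (mul_pos (lt_of_le_of_ne h1 (Ne.symm h1')) (lt_of_le_of_ne h2 (Ne.symm h2')))
          (lt_of_le_of_ne h3 (Ne.symm h3'))
      have hq : 0 ≤ y1 * y2 * y3 := mul_nonneg (mul_nonneg h4 h5) h6
      linarith
    · have hp : 0 < y1 * y2 * y3 :=
        mul_pos (mul_pos (lt_of_le_of_ne h4 (Ne.symm h1')) (lt_of_le_of_ne h5 (Ne.symm h2')))
          (lt_of_le_of_ne h6 (Ne.symm h3'))
      have hq : 0 ≤ x1 * x2 * x3 := mul_nonneg (mul_nonneg h1 h2) h3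
      linarith

theorem pvSpecIdx_three (E : Nat → Nat → Bool) :
    pvSpecIdx 3 E ↔ ((E 0 1 && E 1 2 && E 2 0) || (E 0 2 && E 2 1 && E 1 0)) = true := by
  have hr : List.range' 1 (3 - 1) = [1, 2] := rfl
  constructor
  · rintro ⟨l, hp, hc, hE⟩
    rw [hr] at hp
    have hcases : l = [1, 2] ∨ l = [2, 1] := by
      have hlen := hp.length_eq
      rcases l with _ | ⟨a, _ | ⟨b, _ | ⟨c, t⟩⟩⟩ <;> simp at hlen
      have hnd : ([a, b] : List Nat).Nodup := hp.nodup_iff.mpr (by decide)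
      have hab : a ≠ b := by
        simp only [List.nodup_cons, List.mem_singleton] at hnd
        exact hnd.1
      have ha : a = 1 ∨ a = 2 := by
        have := hp.mem_iff.mp (show a ∈ [a, b] by simp)
        simpa using this
      have hb : b = 1 ∨ b = 2 := by
        have := hp.mem_iff.mp (show b ∈ [a, b] by simp)
        simpa using this
      rcases ha with rfl | rfl <;> rcases hb with rfl | rfl
      · exact absurd rfl hab
      · exact Or.inl rfl
      · exact Or.inr rfl
      · exact absurd rfl hab
    rw [Bool.or_eq_true]
    rcases hcases with rfl | rfl
    · left
      simp only [pvChain, Bool.and_eq_true] at hc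
      have hE' : E 2 0 = true := hE
      simp [hc.1, hc.2.1, hE']
    · right
      simp only [pvChain, Bool.and_eq_true] at hc
      have hE' : E 1 0 = true := hE
      simp [hc.1, hc.2.1, hE']
  · intro h
    rw [Bool.or_eq_true] at h
    rcases h with h | h
    · rw [Bool.and_eq_true, Bool.and_eq_true] at h
      obtain ⟨⟨h1, h2⟩, h3⟩ := h
      refine ⟨[1, 2], ?_, by simp [pvChain, h1, h2], h3⟩
      rw [hr]
    · rw [Bool.and_eq_true, Bool.and_eq_true] at h
      obtain ⟨⟨h1, h2⟩, h3⟩ := h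
      refine ⟨[2, 1], ?_, by simp [pvChain, h1, h2], h3⟩
      rw [hr]
      decide

-- ---- combinations facts ----
theorem pvCombos_sublist {m : Nat} {xs : List Int} {s : List Int} (h : s ∈ pvCombos m xs) :
    s.Sublist xs := by
  induction xs generalizing m s with
  | nil =>
    cases m with
    | zero =>
      have hs : s = [] := by simpa [pvCombos] using h
      subst hs; simp
    | succ m => simp [pvCombos] at h
  | cons x xs ih =>
    cases m with
    | zero =>
      have hs : s = [] := by simpa [pvCombos] using h
      subst hs; simp
    | succ m =>
      simp only [pvCombos, List.mem_append, List.mem_map] at h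
      rcases h with ⟨t, ht, rfl⟩ | h
      · exact List.Sublist.cons₂ x (ih ht)
      · exact List.Sublist.cons x (ih h)

theorem pvCombos_length {m : Nat} {xs : List Int} {s : List Int} (h : s ∈ pvCombos m xs) :
    s.length = m := by
  induction xs generalizing m s with
  | nil =>
    cases m with
    | zero =>
      have hs : s = [] := by simpa [pvCombos] using h
      subst hs; rfl
    | succ m => simp [pvCombos] at h
  | cons x xs ih =>
    cases m with
    | zero =>
      have hs : s = [] := by simpa [pvCombos] using h
      subst hs; rfl
    | succ m =>
      simp only [pvCombos, List.mem_append, List.mem_map] at h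
      rcases h with ⟨t, ht, rfl⟩ | h
      · simp [ih ht]
      · exact ih h

-- ---- per-subset decision equality ----
set_option maxHeartbeats 1000000 in
theorem pvDecide_eq (A : List (List Int)) (p k : Int) (hPre : Pre_compute_co_occ_k A p k)
    (s : List Int) (hs : s ∈ pvCombos k.toNat (PySem.List.pyRange 0 p 1)) :
    pvA_hasHam A s = pvB_hasCycle A s := by
  obtain ⟨hk0, hrest⟩ := hPre
  have hsub := pvCombos_sublist hs
  have hsort : s.Pairwise (· < ·) :=
    List.Pairwise.sublist hsub (PySem.List.pairwise_lt_pyRange_one 0 p)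
  have hnd : s.Nodup := hsort.imp ne_of_lt
  have hmem : ∀ x ∈ s, 0 ≤ x ∧ x < p := by
    intro x hx
    exact PySem.List.mem_pyRange_one.mp (hsub.subset hx)
  rcases Nat.lt_or_ge s.length 2 with h2 | h2
  · have hA0 : pvA_hasHam A s = false := by
      unfold pvA_hasHam
      rw [pvA_small A s h2]
      simp
    have hB0 : pvB_hasCycle A s = false := by
      unfold pvB_hasCycle
      rw [if_pos h2]
    rw [hA0, hB0]
  · rcases eq_or_ne s.length 3 with h3 | h3
    · have hk3 : k = 3 := by
        have := pvCombos_length hs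
        omega
      have hp3 : 3 ≤ p := by
        have hle := hsub.length_le
        rw [PySem.List.length_pyRange_one] at hle
        omega
      obtain ⟨hpA, hrow, hneg⟩ := hrest ⟨by omega, by omega⟩
      have hnnE : ∀ x ∈ s, ∀ y ∈ s, 0 ≤ pvEntry A x y := by
        intro x hx y hy
        obtain ⟨hx0, hxp⟩ := hmem x hx
        obtain ⟨hy0, hyp⟩ := hmem y hy
        have hxNat : x.toNat < A.length := by
          have : x < (A.length : Int) := lt_of_lt_of_le hxp hpA
          omega
        have hrowmem : A[x.toNat] ∈ A.take p.toNat := by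
          have hidx : x.toNat < (A.take p.toNat).length := by
            simp [List.length_take]
            omega
          have hge : (A.take p.toNat)[x.toNat] = A[x.toNat] := List.getElem_take
          rw [← hge]
          exact List.getElem_mem _
        have hrlen := hrow _ hrowmem
        have hyNat : y.toNat < (A[x.toNat]).length := by omega
        have hentry : pvEntry A x y = (A[x.toNat])[y.toNat] := by
          unfold pvEntry
          rw [PySem.List.pyGetD_eq_getElem A [] hx0 (lt_of_lt_of_le hxp hpA)]
          rw [PySem.List.pyGetD_eq_getElem (A[x.toNat]) 0 hy0 (lt_of_lt_of_le hyp hrlen)]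
        rw [hentry]
        refine hneg hk3 _ hrowmem _ ?_
        have hidx2 : y.toNat < ((A[x.toNat]).take p.toNat).length := by
          simp [List.length_take]
          omega
        have hge : ((A[x.toNat]).take p.toNat)[y.toNat] = (A[x.toNat])[y.toNat] :=
          List.getElem_take
        rw [← hge]
        exact List.getElem_mem _
      rcases s with _ | ⟨a, _ | ⟨b, _ | ⟨c, _ | ⟨d, t⟩⟩⟩⟩ <;> simp at h3
      have hne1 : 0 ≤ pvEntry A a b := hnnE a (by simp) b (by simp)
      have hne2 : 0 ≤ pvEntry A b c := hnnE b (by simp) c (by simp)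
      have hne3 : 0 ≤ pvEntry A c a := hnnE c (by simp) a (by simp)
      have hne4 : 0 ≤ pvEntry A a c := hnnE a (by simp) c (by simp)
      have hne5 : 0 ≤ pvEntry A c b := hnnE c (by simp) b (by simp)
      have hne6 : 0 ≤ pvEntry A b a := hnnE b (by simp) a (by simp)
      have hAval : pvA_countHam A [a, b, c] =
          pvEntry A a b * pvEntry A b c * pvEntry A c a +
            pvEntry A a c * pvEntry A c b * pvEntry A b a := by
        unfold pvA_countHam
        rfl
      have hBiff := pvB_hasCycle_iff A [a, b, c] hnd (by simp)
      rw [show ([a, b, c] : List Int).length = 3 from rfl, pvSpecIdx_three] at hBiff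
      have hBiff' : pvB_hasCycle A [a, b, c] = true ↔
          ((pvEL A a b && pvEL A b c && pvEL A c a) ||
            (pvEL A a c && pvEL A c b && pvEL A b a)) = true := hBiff
      rw [Bool.eq_iff_iff]
      unfold pvA_hasHam
      rw [decide_eq_true_eq, gt_iff_lt, hAval,
        pvFormula_pos _ _ _ _ _ _ hne1 hne2 hne3 hne4 hne5 hne6, hBiff']
      simp only [pvEL, Bool.or_eq_true, Bool.and_eq_true, decide_eq_true_eq]
      constructor
      · rintro (⟨u1, u2, u3⟩ | ⟨u1, u2, u3⟩)
        · exact Or.inl ⟨⟨u1, u2⟩, u3⟩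
        · exact Or.inr ⟨⟨u1, u2⟩, u3⟩
      · rintro (⟨⟨u1, u2⟩, u3⟩ | ⟨⟨u1, u2⟩, u3⟩)
        · exact Or.inl ⟨u1, u2, u3⟩
        · exact Or.inr ⟨u1, u2, u3⟩
    · rw [Bool.eq_iff_iff]
      unfold pvA_hasHam
      rw [decide_eq_true_eq, gt_iff_lt, pvA_char A s h3 h2, pvB_hasCycle_iff A s hnd h2]

-- ---- bookkeeping: the fused fold equals A's four passes ----
theorem pvHead0 (s : List Int) (hp : s.Pairwise (· < ·)) (hnn : ∀ x ∈ s, 0 ≤ x)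
    (h0 : (0 : Int) ∈ s) : s.head? = some 0 := by
  cases s with
  | nil => cases h0
  | cons x t =>
    rcases List.mem_cons.mp h0 with h | h
    · rw [← h]
      rfl
    · have hx0 : (0 : Int) ≤ x := hnn x List.mem_cons_self
      have hlt : x < 0 := (List.pairwise_cons.mp hp).1 0 h
      omega

theorem pvBump_eq (s : List Int) (hp : s.Pairwise (· < ·)) (hhead : s.head? = some 0)
    (pr : List Int) :
    pvA_bumpSet pr s = (s.drop 1).foldl
      (fun pr v => PySem.List.pySetD pr v (PySem.List.pyGetD pr v 0 + 1)) pr := by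
  cases s with
  | nil => simp at hhead
  | cons x t =>
    have hx : x = 0 := by simpa using hhead
    subst hx
    unfold pvA_bumpSet
    rw [List.foldl_cons, if_neg (by simp)]
    rw [show ((0 : Int) :: t).drop 1 = t from rfl]
    apply PySem.List.foldl_congr_mem
    intro acc v hv
    have hvpos : (0 : Int) < v := (List.pairwise_cons.mp hp).1 v hv
    rw [if_pos (by omega)]

theorem pvML (A : List (List Int)) : ∀ (l : List (List Int)),
    (∀ s ∈ l, pvA_hasHam A s = pvB_hasCycle A s ∧ s.Pairwise (· < ·) ∧ (∀ x ∈ s, 0 ≤ x)) →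
    ∀ (pr : List Int) (ns n0 : Int),
    l.foldl (pvB_step A) (pr, ns, n0) =
      (((l.filter (pvA_hasHam A)).filter (fun fs => PySem.Set.contains fs 0)).foldl
          pvA_bumpSet pr,
        ns + ((l.filter (pvA_hasHam A)).length : Int),
        n0 + (((l.filter (pvA_hasHam A)).filter (fun fs => PySem.Set.contains fs 0)).length
          : Int)) := by
  intro l
  induction l with
  | nil =>
    intro _ pr ns n0
    simp
  | cons s l ih =>
    intro h pr ns n0
    obtain ⟨hAB, hsort, hnn⟩ := h s List.mem_cons_self
    have hrest := fun s' hs' => h s' (List.mem_cons_of_mem _ hs')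
    rw [List.foldl_cons]
    cases hB : pvB_hasCycle A s with
    | false =>
      have hA : pvA_hasHam A s = false := by rw [hAB, hB]
      rw [show pvB_step A (pr, ns, n0) s = (pr, ns, n0) from by
        unfold pvB_step
        rw [if_neg (by simp [hB])]]
      rw [ih hrest]
      simp [List.filter_cons, hA]
    | true =>
      have hA : pvA_hasHam A s = true := by rw [hAB, hB]
      by_cases h0 : PySem.Set.contains s 0 = true
      · have h0m : (0 : Int) ∈ s := (PySem.Set.contains_iff s 0).mp h0
        have hhead := pvHead0 s hsort hnn h0m
        rw [show pvB_step A (pr, ns, n0) s =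
            ((s.drop 1).foldl
              (fun pr v => PySem.List.pySetD pr v (PySem.List.pyGetD pr v 0 + 1)) pr,
              ns + 1, n0 + 1) from by
          unfold pvB_step
          rw [if_pos hB, if_pos hhead]]
        rw [ih hrest, ← pvBump_eq s hsort hhead pr]
        simp only [List.filter_cons, hA, h0, if_pos, List.foldl_cons, List.length_cons]
        refine congrArg₂ Prod.mk rfl (congrArg₂ Prod.mk ?_ ?_)
        · push_cast
          ring
        · push_cast
          ring
      · have hheadne : ¬ (s.head? = some 0) := by
          intro hh
          apply h0
          apply (PySem.Set.contains_iff s 0).mpr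
          cases s with
          | nil => simp at hh
          | cons x t =>
            simp only [List.head?_cons, Option.some.injEq] at hh
            simp [hh]
        have h0f : PySem.Set.contains s 0 = false := by
          cases hc : PySem.Set.contains s 0
          · rfl
          · exact absurd hc h0
        rw [show pvB_step A (pr, ns, n0) s = (pr, ns + 1, n0) from by
          unfold pvB_step
          rw [if_pos hB, if_neg hheadne]]
        rw [ih hrest]
        simp only [List.filter_cons, hA, h0f, if_pos, List.length_cons]
        rw [show (if (false : Bool) = true then
            s :: List.filter (fun fs => PySem.Set.contains fs 0) (List.filter (pvA_hasHam A) l)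
            else List.filter (fun fs => PySem.Set.contains fs 0) (List.filter (pvA_hasHam A) l)) =
            List.filter (fun fs => PySem.Set.contains fs 0) (List.filter (pvA_hasHam A) l) from by
          simp]
        refine congrArg₂ Prod.mk rfl (congrArg₂ Prod.mk ?_ rfl)
        push_cast
        ring

-- ===== VERDICT (by name: the statement is the Claim_ definition above) =====
theorem compute_co_occ_k_spec : Claim_equal_compute_co_occ_k := by
  intro A p k hDom hPre
  unfold Spec_compute_co_occ_k
  have hprops : ∀ s ∈ pvCombos k.toNat (PySem.List.pyRange 0 p 1),
      pvA_hasHam A s = pvB_hasCycle A s ∧ s.Pairwise (· < ·) ∧ (∀ x ∈ s, 0 ≤ x) := by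
    intro s hs
    have hsub := pvCombos_sublist hs
    refine ⟨pvDecide_eq A p k hPre s hs,
      List.Pairwise.sublist hsub (PySem.List.pairwise_lt_pyRange_one 0 p), ?_⟩
    intro x hx
    exact (PySem.List.mem_pyRange_one.mp (hsub.subset hx)).1
  unfold compute_co_occ_k compute_co_occ_k_alt pvA_cycleSets
  rw [PySem.List.foldl_append_if (pvA_hasHam A) PySem.Set.ofList
    (pvCombos k.toNat (PySem.List.pyRange 0 p 1)) []]
  rw [List.nil_append]
  have hmap : ((pvCombos k.toNat (PySem.List.pyRange 0 p 1)).filter (pvA_hasHam A)).map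
      PySem.Set.ofList = (pvCombos k.toNat (PySem.List.pyRange 0 p 1)).filter (pvA_hasHam A) := by
    have hself : ∀ s ∈ (pvCombos k.toNat (PySem.List.pyRange 0 p 1)).filter (pvA_hasHam A),
        PySem.Set.ofList s = s := by
      intro s hsf
      have hsmem := List.mem_of_mem_filter hsf
      exact PySem.Set.ofList_eq_self_of_nodup s ((hprops s hsmem).2.1.imp ne_of_lt)
    have h1 : ((pvCombos k.toNat (PySem.List.pyRange 0 p 1)).filter (pvA_hasHam A)).map
        PySem.Set.ofList =
        ((pvCombos k.toNat (PySem.List.pyRange 0 p 1)).filter (pvA_hasHam A)).map id :=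
      List.map_congr_left hself
    rw [h1, List.map_id]
  rw [hmap]
  rw [pvML A (pvCombos k.toNat (PySem.List.pyRange 0 p 1)) hprops
    (List.replicate p.toNat 0) 0 0]
  simp
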